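-- pv_equiv track=rewrite | github.com/NilsHasNoGithub/product_category_prediction | product_prediction/utils.py | split_into_n_chunks
-- ===== SOURCE A (Python) =====
-- from typing import (
--     Any,
--     Callable,
--     Iterable,
--     List,
--     Optional,
--     Sequence,
--     TypeVar,
--     Union,
-- )
--
-- T = TypeVar("T")
--
-- def split_into_n_chunks(items: Sequence[T], num_chunks: int) -> Iterable[List[T]]:
--     """Split `items` into `num_chunks` chunks"""
--     base_chunk_size, remainder = divmod(len(items), num_chunks)
--     i_start = 0
--
--     for i_chunk in range(num_chunks):
--         chunk_size = base_chunk_size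
--
--         if remainder > i_chunk:
--             chunk_size += 1
--
--         yield items[i_start : i_start + chunk_size]
--
--         i_start += chunk_size
-- ===== SOURCE B (Python) =====
-- def split_into_n_chunks(items, num_chunks):
--     """Split `items` into `num_chunks` chunks (extra elements go to the first chunks)."""
--     base, remainder = divmod(len(items), num_chunks)
--     emitted = 0
--     current = []
--     for x in items:
--         current.append(x)
--         if len(current) == base + (1 if emitted < remainder else 0):
--             yield current
--             emitted += 1
--             current = []
--     while emitted < num_chunks:
--         yield []
--         emitted += 1
-- ===== Notes on version B (the rewrite author's own statement) =====
-- stated objective: alternative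
-- what changed: Replaced the chunk-index loop that slices items[i_start:i_start+size] by a single element-wise pass that fills the current chunk and yields it when it reaches its target size (base+1 for the first `remainder` chunks), emitting any remaining empty chunks afterwards.
import Mathlib
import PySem

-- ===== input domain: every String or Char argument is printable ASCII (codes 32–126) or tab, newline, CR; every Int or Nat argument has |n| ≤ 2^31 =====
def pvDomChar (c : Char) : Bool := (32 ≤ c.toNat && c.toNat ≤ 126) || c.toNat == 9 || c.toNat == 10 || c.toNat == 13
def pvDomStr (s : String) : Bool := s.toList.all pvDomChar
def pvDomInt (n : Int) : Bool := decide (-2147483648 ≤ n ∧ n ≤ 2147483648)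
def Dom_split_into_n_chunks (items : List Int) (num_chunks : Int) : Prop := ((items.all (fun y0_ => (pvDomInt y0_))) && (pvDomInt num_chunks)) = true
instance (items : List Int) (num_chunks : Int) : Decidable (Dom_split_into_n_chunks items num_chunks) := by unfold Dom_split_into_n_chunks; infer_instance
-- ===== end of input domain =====

-- B replaces A's chunk-index loop with slicing by a single element-wise pass that fills and
-- emits chunks as they reach their target size (alternative decomposition, same cost).
-- Both A and B are Python generators; the equivalence is about the fully consumed sequence of chunks.

-- ===== PORT A =====
def split_into_n_chunks (items : List Int) (num_chunks : Int) : List (List Int) :=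
  match PySem.Int.divmod? (items.length : Int) num_chunks with
  | none => []  -- num_chunks = 0: divmod raises ZeroDivisionError; excluded by Pre_
  | some (base_chunk_size, remainder) =>
    (((PySem.List.pyRange 0 num_chunks 1).foldl
        (fun (st : Int × List (List Int)) i_chunk =>
          let chunk_size := base_chunk_size + (if remainder > i_chunk then 1 else 0)
          (st.1 + chunk_size,
           st.2 ++ [PySem.List.slice items (some st.1) (some (st.1 + chunk_size))]))
        (0, [])).2)

-- ===== PORT B =====
-- the trailing 'while emitted < num_chunks: yield []' loop of Source B
def emitEmpties (num_chunks emitted : Int) : List (List Int) :=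
  if emitted < num_chunks then [] :: emitEmpties num_chunks (emitted + 1) else []
termination_by (num_chunks - emitted).toNat
decreasing_by omega

def split_into_n_chunks_alt (items : List Int) (num_chunks : Int) : List (List Int) :=
  match PySem.Int.divmod? (items.length : Int) num_chunks with
  | none => []  -- num_chunks = 0: divmod raises ZeroDivisionError; excluded by Pre_
  | some (base, remainder) =>
    let st := items.foldl
      (fun (st : Int × List Int × List (List Int)) x =>
        let current := st.2.1 ++ [x]
        if (current.length : Int) = base + (if st.1 < remainder then 1 else 0)
        then (st.1 + 1, ([] : List Int), st.2.2 ++ [current])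
        else (st.1, current, st.2.2))
      (0, ([] : List Int), ([] : List (List Int)))
    st.2.2 ++ emitEmpties num_chunks st.1

-- ===== PRECONDITION & SPEC =====
-- Pre_ excludes only num_chunks = 0, where both Pythons raise ZeroDivisionError.
def Pre_split_into_n_chunks (items : List Int) (num_chunks : Int) : Prop := num_chunks ≠ 0
instance (items : List Int) (num_chunks : Int) : Decidable (Pre_split_into_n_chunks items num_chunks) := by unfold Pre_split_into_n_chunks; infer_instance
def pvWitness_split_into_n_chunks : List Int × Int := ([1, 2, 3, 4, 5], 2)

def Spec_split_into_n_chunks (items : List Int) (num_chunks : Int) (out : List (List Int)) : Prop := out = split_into_n_chunks_alt items num_chunks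
instance (items : List Int) (num_chunks : Int) (out : List (List Int)) : Decidable (Spec_split_into_n_chunks items num_chunks out) := by unfold Spec_split_into_n_chunks; infer_instance

-- ===== CLAIM (what is proved, stated in full; the proofs are below) =====
def Claim_equal_split_into_n_chunks : Prop := ∀ (items : List Int) (num_chunks : Int), Dom_split_into_n_chunks items num_chunks → Pre_split_into_n_chunks items num_chunks → Spec_split_into_n_chunks items num_chunks (split_into_n_chunks items num_chunks)

-- ===== LEMMAS AND PROOFS =====

-- reference shape: the list of chunks for indices e..n-1, peeled off the front of rest
def refChunks (base rem : Int) (n e : Int) (rest : List Int) : List (List Int) :=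
  if e < n then
    rest.take (base + (if e < rem then 1 else 0)).toNat ::
      refChunks base rem n (e + 1) (rest.drop (base + (if e < rem then 1 else 0)).toNat)
  else []
termination_by (n - e).toNat
decreasing_by omega



lemma emitEmpties_of_le (n e : Int) (h : n ≤ e) : emitEmpties n e = [] := by
  unfold emitEmpties; rw [if_neg (by omega)]

lemma refChunks_of_le (base rem n e : Int) (rest : List Int) (h : n ≤ e) :
    refChunks base rem n e rest = [] := by
  unfold refChunks; rw [if_neg (by omega)]

lemma refChunks_empty_eq_emitEmpties (rem n e : Int) (h : rem ≤ e) :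
    refChunks 0 rem n e ([] : List Int) = emitEmpties n e := by
  unfold refChunks emitEmpties
  by_cases hlt : e < n
  · rw [if_pos hlt, if_pos hlt, if_neg (by omega)]
    simp only [zero_add, Int.toNat_zero, List.take_zero, List.drop_zero]
    exact congrArg (List.cons []) (refChunks_empty_eq_emitEmpties rem n (e + 1) (by omega))
  · rw [if_neg hlt, if_neg hlt]
termination_by (n - e).toNat
decreasing_by omega

lemma A_char (items : List Int) (base rem n : Int) (hb : 0 ≤ base) (hr : 0 ≤ rem)
    (e s : Int) (acc : List (List Int)) (hs : 0 ≤ s) :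
    ((PySem.List.pyRange e n 1).foldl
        (fun (st : Int × List (List Int)) i_chunk =>
          let chunk_size := base + (if rem > i_chunk then 1 else 0)
          (st.1 + chunk_size,
           st.2 ++ [PySem.List.slice items (some st.1) (some (st.1 + chunk_size))]))
        (s, acc)).2
      = acc ++ refChunks base rem n e (items.drop s.toNat) := by
  by_cases h : e < n
  · rw [PySem.List.pyRange_one_cons h]
    simp only [List.foldl_cons]
    have hcs : 0 ≤ base + (if rem > e then 1 else 0) := by split_ifs <;> omega
    rw [A_char items base rem n hb hr (e + 1)
        (s + (base + (if rem > e then 1 else 0)))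
        (acc ++ [PySem.List.slice items (some s)
          (some (s + (base + (if rem > e then 1 else 0))))]) (by omega)]
    conv_rhs => rw [refChunks, if_pos h]
    rw [PySem.List.slice_toNat items hs (by omega)]
    simp only [gt_iff_lt]
    have h2 : (s + (base + if e < rem then 1 else 0)).toNat - s.toNat
        = (base + if e < rem then 1 else 0).toNat := by split_ifs at * <;> omega
    have h1 : (s + (base + if e < rem then 1 else 0)).toNat
        = s.toNat + (base + if e < rem then 1 else 0).toNat := by split_ifs at * <;> omega
    rw [h2, h1, List.append_assoc, ← List.drop_drop]
    rfl
  · rw [show PySem.List.pyRange e n 1 = [] by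
        rw [PySem.List.pyRange_one]; simp; omega]
    rw [refChunks_of_le base rem n e _ (by omega)]
    simp
termination_by (n - e).toNat
decreasing_by omega

lemma B_fill (base rem : Int) (c2 : List Int) :
    ∀ (rest : List Int) (e : Int) (cur : List Int) (acc : List (List Int)),
    c2 ≠ [] → ((cur.length : Int) + c2.length = base + (if e < rem then 1 else 0)) →
    (c2 ++ rest).foldl
        (fun (st : Int × List Int × List (List Int)) x =>
          let current := st.2.1 ++ [x]
          if (current.length : Int) = base + (if st.1 < rem then 1 else 0)
          then (st.1 + 1, ([] : List Int), st.2.2 ++ [current])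
          else (st.1, current, st.2.2))
        (e, cur, acc)
      = rest.foldl
        (fun (st : Int × List Int × List (List Int)) x =>
          let current := st.2.1 ++ [x]
          if (current.length : Int) = base + (if st.1 < rem then 1 else 0)
          then (st.1 + 1, ([] : List Int), st.2.2 ++ [current])
          else (st.1, current, st.2.2))
        (e + 1, [], acc ++ [cur ++ c2]) := by
  induction c2 with
  | nil => intro _ _ _ _ hne _; exact absurd rfl hne
  | cons x c2' ih =>
    intro rest e cur acc _ hlen
    simp only [List.cons_append, List.foldl_cons]
    by_cases hc : c2' = []
    · subst hc
      simp only [List.length_cons, List.length_nil] at hlen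
      simp only [if_pos (show ((cur ++ [x]).length : Int)
          = base + (if e < rem then 1 else 0) by
        simp only [List.length_append, List.length_cons, List.length_nil]
        push_cast at hlen ⊢; omega)]
      simp
    · have hlen' : ((cur ++ [x]).length : Int) + c2'.length
          = base + (if e < rem then 1 else 0) := by
        simp only [List.length_cons] at hlen
        simp only [List.length_append, List.length_cons, List.length_nil]
        push_cast at hlen ⊢; omega
      have hne : ¬ ((cur ++ [x]).length : Int) = base + (if e < rem then 1 else 0) := by
        have h1 : 1 ≤ (c2'.length : Int) := by
          cases c2' with
          | nil => exact absurd rfl hc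
          | cons _ _ => simp only [List.length_cons]; push_cast; omega
        omega
      simp only [if_neg hne]
      rw [ih rest e (cur ++ [x]) acc hc hlen']
      simp

lemma B_neg (base rem : Int) (hb : base + (if (0 : Int) < rem then 1 else 0) ≤ 0) (xs : List Int) :
    ∀ (cur : List Int) (acc : List (List Int)),
    xs.foldl
        (fun (st : Int × List Int × List (List Int)) x =>
          let current := st.2.1 ++ [x]
          if (current.length : Int) = base + (if st.1 < rem then 1 else 0)
          then (st.1 + 1, ([] : List Int), st.2.2 ++ [current])
          else (st.1, current, st.2.2))
        (0, cur, acc)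
      = (0, cur ++ xs, acc) := by
  induction xs with
  | nil => intro cur acc; simp
  | cons x xs' ih =>
    intro cur acc
    simp only [List.foldl_cons]
    have hne : ¬ ((cur ++ [x]).length : Int) = base + (if (0 : Int) < rem then 1 else 0) := by
      simp only [List.length_append, List.length_cons, List.length_nil]
      push_cast; omega
    simp only [if_neg hne]
    rw [ih (cur ++ [x]) acc]
    simp

lemma B_char (base rem n : Int) (hb : 0 ≤ base) (hr : 0 ≤ rem) (hrn : rem ≤ n)
    (e : Int) (rest : List Int) (acc : List (List Int)) (he0 : 0 ≤ e) (hen : e ≤ n)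
    (hlen : (rest.length : Int) = (n - e) * base + max (rem - e) 0) :
    (rest.foldl
        (fun (st : Int × List Int × List (List Int)) x =>
          let current := st.2.1 ++ [x]
          if (current.length : Int) = base + (if st.1 < rem then 1 else 0)
          then (st.1 + 1, ([] : List Int), st.2.2 ++ [current])
          else (st.1, current, st.2.2))
        (e, [], acc)).2.2
      ++ emitEmpties n (rest.foldl
        (fun (st : Int × List Int × List (List Int)) x =>
          let current := st.2.1 ++ [x]
          if (current.length : Int) = base + (if st.1 < rem then 1 else 0)
          then (st.1 + 1, ([] : List Int), st.2.2 ++ [current])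
          else (st.1, current, st.2.2))
        (e, [], acc)).1
      = acc ++ refChunks base rem n e rest := by
  by_cases h : e < n
  · set t : Int := base + (if e < rem then 1 else 0) with ht
    by_cases htpos : 0 < t
    · -- rest is long enough for one chunk
      have hmul : (1 : Int) * base ≤ (n - e) * base :=
        mul_le_mul_of_nonneg_right (by omega) hb
      have hrest : t ≤ (rest.length : Int) := by
        by_cases hre : e < rem
        · rw [ht, if_pos hre]
          rw [max_eq_left (by omega)] at hlen
          linarith
        · rw [ht, if_neg hre]
          rw [max_eq_right (by omega)] at hlen
          linarith
      have hc_len : ((rest.take t.toNat).length : Int) = t := by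
        simp [List.length_take]; omega
      have hcne : rest.take t.toNat ≠ [] := by
        intro hnil
        rw [hnil] at hc_len
        simp at hc_len; omega
      have hsplit := List.take_append_drop t.toNat rest
      conv_lhs => rw [← hsplit]
      rw [B_fill base rem (rest.take t.toNat) (rest.drop t.toNat) e [] acc hcne
        (by simpa using hc_len)]
      have hlen' : ((rest.drop t.toNat).length : Int)
          = (n - (e + 1)) * base + max (rem - (e + 1)) 0 := by
        have hring : (n - e) * base = (n - (e + 1)) * base + base := by ring
        simp only [List.length_drop]
        have hcast : ((rest.length - t.toNat : Nat) : Int) = (rest.length : Int) - t := by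
          omega
        rw [hcast, ht]
        by_cases hre : e < rem
        · simp only [if_pos hre]
          rw [max_eq_left (by omega)] at hlen
          rw [max_eq_left (by omega)]
          linarith [hring]
        · simp only [if_neg hre]
          rw [max_eq_right (by omega)] at hlen
          rw [max_eq_right (by omega)]
          linarith [hring]
      rw [B_char base rem n hb hr hrn (e + 1) (rest.drop t.toNat)
        (acc ++ [[] ++ rest.take t.toNat]) (by omega) (by omega) hlen']
      conv_rhs => rw [refChunks, if_pos h]
      simp [← ht]
    · -- t = 0: base = 0 and rem ≤ e, rest must be empty
      have hbz : base = 0 := by rw [ht] at htpos; split_ifs at htpos <;> omega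
      have hre : rem ≤ e := by
        by_contra hre
        rw [ht, if_pos (by omega)] at htpos; omega
      have hrestnil : rest = [] := by
        have hz : (rest.length : Int) = 0 := by
          rw [hbz, max_eq_right (by omega)] at hlen
          simpa using hlen
        exact List.eq_nil_of_length_eq_zero (by omega)
      subst hrestnil hbz
      simp only [List.foldl_nil]
      rw [refChunks_empty_eq_emitEmpties rem n e hre]
  · have hrestnil : rest = [] := by
      rw [max_eq_right (by omega)] at hlen
      have : (n - e) * base = 0 := by
        have : n - e = 0 := by omega
        rw [this]; ring
      rw [this] at hlen
      exact List.eq_nil_of_length_eq_zero (by omega)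
    subst hrestnil
    simp only [List.foldl_nil]
    rw [emitEmpties_of_le n e (by omega), refChunks_of_le base rem n e _ (by omega)]
termination_by (n - e).toNat
decreasing_by omega

-- ===== VERDICT (by name: the statement is the Claim_ definition above) =====
theorem split_into_n_chunks_spec : Claim_equal_split_into_n_chunks := by
  intro items n _hdom hpre
  have hne : n ≠ 0 := hpre
  unfold Spec_split_into_n_chunks split_into_n_chunks split_into_n_chunks_alt
  rw [show PySem.Int.divmod? (items.length : Int) n
      = some (PySem.Int.floordiv (items.length : Int) n, PySem.Int.mod (items.length : Int) n) by
    simp [PySem.Int.divmod?, PySem.Int.floordiv, PySem.Int.mod, hne]]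
  set base := PySem.Int.floordiv (items.length : Int) n with hbase
  set rem := PySem.Int.mod (items.length : Int) n with hrem
  have hsum : base * n + rem = (items.length : Int) :=
    PySem.Int.floordiv_mul_add_mod (items.length : Int) n
  rcases lt_or_gt_of_ne hne with hneg | hpos
  · -- n < 0 : both sides are []
    have hr0 : rem ≤ 0 := (PySem.Int.mod_neg_bounds (items.length : Int) hneg).2
    have hb0 : base ≤ 0 := by
      by_contra hb
      have hb1 : 1 ≤ base := by omega
      nlinarith [Int.natCast_nonneg items.length]
    simp only []
    rw [show PySem.List.pyRange 0 n 1 = [] by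
      rw [PySem.List.pyRange_one]; simp; omega]
    have hb' : base + (if (0 : Int) < rem then 1 else 0) ≤ 0 := by
      split_ifs with hif
      · omega
      · omega
    rw [B_neg base rem hb' items [] []]
    simp [List.foldl_nil, emitEmpties_of_le n 0 (by omega)]
  · -- n > 0
    have hb : 0 ≤ base := by
      rw [hbase, PySem.Int.floordiv_eq_ediv_of_pos hpos]
      exact Int.ediv_nonneg (Int.natCast_nonneg _) (by omega)
    have hr : 0 ≤ rem := PySem.Int.mod_nonneg (items.length : Int) hpos
    have hrn : rem ≤ n := le_of_lt (PySem.Int.mod_lt (items.length : Int) hpos)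
    simp only []
    rw [A_char items base rem n hb hr 0 0 [] le_rfl]
    rw [B_char base rem n hb hr hrn 0 items [] le_rfl (by omega)
      (by rw [max_eq_left (by omega)]
          have h' : (n - 0) * base = base * n := by ring
          rw [h']; linarith [hsum])]
    simp
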